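-- pv_equiv track=rewrite | github.com/jay-thakur/geeksforgeeks_py | practice/Basic/xor_of_all_elements.py | xor_of_all_element
-- ===== SOURCE A (Python) =====
-- def xor_of_all_element(arr, size):
--     res = []
--     rr = 0
--     for i in range(size):
--         rr ^= arr[i]
--     for i in range(size):
--         res.append(rr ^ arr[i])
--     return res
-- ===== SOURCE B (Python) =====
-- def xor_of_all_element(arr, size):
--     n = size if size > 0 else 0
--     prefix = [0]                     # prefix[k] = XOR of arr[0:k]
--     for i in range(n):
--         prefix.append(prefix[-1] ^ arr[i])
--     suffix = [0]                     # built back-to-front: XOR of arr[i:n]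
--     for i in range(n - 1, -1, -1):
--         suffix.append(suffix[-1] ^ arr[i])
--     suffix.reverse()                 # suffix[k] = XOR of arr[k:n]
--     return [prefix[i] ^ suffix[i + 1] for i in range(n)]
-- ===== Notes on version B (the rewrite author's own statement) =====
-- stated objective: alternative
-- what changed: A computes one global XOR and emits total^arr[i]; B builds a prefix-XOR table and a backward-built suffix-XOR table and emits prefix[i]^suffix[i+1], maintaining different state and traversing the data forwards and backwards.
import Mathlib
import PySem

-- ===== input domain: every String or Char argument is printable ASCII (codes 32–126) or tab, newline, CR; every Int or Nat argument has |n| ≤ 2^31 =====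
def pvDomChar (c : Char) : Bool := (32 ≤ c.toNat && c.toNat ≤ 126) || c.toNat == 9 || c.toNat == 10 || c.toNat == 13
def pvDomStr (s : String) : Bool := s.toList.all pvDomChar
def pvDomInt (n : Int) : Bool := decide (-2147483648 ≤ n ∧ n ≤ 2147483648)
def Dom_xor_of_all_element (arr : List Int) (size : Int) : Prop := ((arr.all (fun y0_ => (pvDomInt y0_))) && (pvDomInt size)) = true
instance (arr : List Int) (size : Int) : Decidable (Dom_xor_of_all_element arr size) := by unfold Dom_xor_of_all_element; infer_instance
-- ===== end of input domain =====

-- B replaces A's single global-XOR accumulator by prefix/suffix XOR tables (res[i] = prefix[i] ^ suffix[i+1]); alternative decomposition, same cost.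


-- ===== PORT A =====
def xor_of_all_element (arr : List Int) (size : Int) : List Int :=
  let rr := (PySem.List.pyRange 0 size 1).foldl
      (fun rr i => PySem.Int.bxor rr (PySem.List.pyGetD arr i 0)) 0
  (PySem.List.pyRange 0 size 1).foldl
      (fun res i => res ++ [PySem.Int.bxor rr (PySem.List.pyGetD arr i 0)]) []

-- ===== PORT B =====
def xor_of_all_element_alt (arr : List Int) (size : Int) : List Int :=
  let n := if 0 < size then size else 0
  let prefix_ := (PySem.List.pyRange 0 n 1).foldl
      (fun p i => p ++ [PySem.Int.bxor (PySem.List.pyGetD p (-1) 0) (PySem.List.pyGetD arr i 0)]) [0]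
  let suffixRev := (PySem.List.pyRange (n - 1) (-1) (-1)).foldl
      (fun s i => s ++ [PySem.Int.bxor (PySem.List.pyGetD s (-1) 0) (PySem.List.pyGetD arr i 0)]) [0]
  let suffix := suffixRev.reverse
  (PySem.List.pyRange 0 n 1).map
      (fun i => PySem.Int.bxor (PySem.List.pyGetD prefix_ i 0) (PySem.List.pyGetD suffix (i + 1) 0))

-- ===== PRECONDITION & SPEC =====
-- Pre_ excludes size > len(arr), where the Python A raises IndexError (arr[i] out of range).
def Pre_xor_of_all_element (arr : List Int) (size : Int) : Prop := size ≤ (arr.length : Int)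
instance (arr : List Int) (size : Int) : Decidable (Pre_xor_of_all_element arr size) := by unfold Pre_xor_of_all_element; infer_instance
def pvWitness_xor_of_all_element : List Int × Int := ([5, 1, 2], 3)
def Spec_xor_of_all_element (arr : List Int) (size : Int) (out : List Int) : Prop := out = xor_of_all_element_alt arr size
instance (arr : List Int) (size : Int) (out : List Int) : Decidable (Spec_xor_of_all_element arr size out) := by unfold Spec_xor_of_all_element; infer_instance

-- ===== CLAIM (what is proved, stated in full; the proofs are below) =====
def Claim_equal_xor_of_all_element : Prop := ∀ (arr : List Int) (size : Int), Dom_xor_of_all_element arr size → Pre_xor_of_all_element arr size → Spec_xor_of_all_element arr size (xor_of_all_element arr size)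

-- ===== LEMMAS AND PROOFS =====

-- bxor on Int constructors
theorem bxor_negSucc_ofNat (m n : Nat) : PySem.Int.bxor (Int.negSucc m) (Int.ofNat n) = Int.negSucc (m ^^^ n) := by
  unfold PySem.Int.bxor
  simp [Int.negSucc_eq]
  omega
theorem bxor_ofNat_negSucc (m n : Nat) : PySem.Int.bxor (Int.ofNat m) (Int.negSucc n) = Int.negSucc (m ^^^ n) := by
  unfold PySem.Int.bxor
  simp [Int.negSucc_eq]
  omega
theorem bxor_negSucc_negSucc (m n : Nat) : PySem.Int.bxor (Int.negSucc m) (Int.negSucc n) = Int.ofNat (m ^^^ n) := by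
  unfold PySem.Int.bxor
  have h : ¬ (0:Int) ≤ Int.negSucc m := by omega
  have h' : ¬ (0:Int) ≤ Int.negSucc n := by omega
  simp [h, h']
theorem bxor_ofNat_ofNat (m n : Nat) : PySem.Int.bxor (Int.ofNat m) (Int.ofNat n) = Int.ofNat (m ^^^ n) := by
  simp [PySem.Int.bxor_natCast m n]

theorem bxor_assoc' (a b c : Int) : PySem.Int.bxor (PySem.Int.bxor a b) c = PySem.Int.bxor a (PySem.Int.bxor b c) := by
  cases a <;> cases b <;> cases c <;>
    simp only [bxor_ofNat_ofNat, bxor_ofNat_negSucc, bxor_negSucc_ofNat, bxor_negSucc_negSucc, Nat.xor_assoc]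

theorem zero_bxor (a : Int) : PySem.Int.bxor 0 a = a := by
  rw [PySem.Int.bxor_comm, PySem.Int.bxor_zero]

-- XOR of a whole list
def xorAll (l : List Int) : Int := l.foldl PySem.Int.bxor 0

theorem foldl_bxor (l : List Int) (a : Int) : l.foldl PySem.Int.bxor a = PySem.Int.bxor a (xorAll l) := by
  induction l generalizing a with
  | nil => simp [xorAll]
  | cons x l ih =>
    simp only [List.foldl_cons, xorAll]
    rw [ih (PySem.Int.bxor a x), ih (PySem.Int.bxor 0 x), zero_bxor, bxor_assoc']

theorem xorAll_cons (x : Int) (l : List Int) : xorAll (x :: l) = PySem.Int.bxor x (xorAll l) := by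
  simp only [xorAll, List.foldl_cons]
  rw [foldl_bxor, zero_bxor]
  rfl

theorem xorAll_append (l₁ l₂ : List Int) : xorAll (l₁ ++ l₂) = PySem.Int.bxor (xorAll l₁) (xorAll l₂) := by
  simp only [xorAll, List.foldl_append]
  rw [foldl_bxor]
  rfl

theorem xorAll_reverse (l : List Int) : xorAll l.reverse = xorAll l := by
  induction l with
  | nil => rfl
  | cons x l ih =>
    have hx : xorAll [x] = x := by
      simp only [xorAll, List.foldl_cons, List.foldl_nil]
      rw [zero_bxor]
    rw [List.reverse_cons, xorAll_append, ih, hx, xorAll_cons, PySem.Int.bxor_comm]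

-- the 3-variable cancellation used at the end:  (p ^ (y ^ s)) ^ y = p ^ s
theorem bxor_cancel (p y s : Int) :
    PySem.Int.bxor (PySem.Int.bxor p (PySem.Int.bxor y s)) y = PySem.Int.bxor p s := by
  rw [bxor_assoc', PySem.Int.bxor_comm y s, bxor_assoc', PySem.Int.bxor_self, PySem.Int.bxor_zero]

-- a fold that only reads the accumulator's last element and appends ignores a prefix of the accumulator
theorem fold_shift (h : Int → Int) (idxs : List Int) (acc l : List Int) (hl : l ≠ []) :
    idxs.foldl (fun p i => p ++ [PySem.Int.bxor (PySem.List.pyGetD p (-1) 0) (h i)]) (acc ++ l)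
      = acc ++ idxs.foldl (fun p i => p ++ [PySem.Int.bxor (PySem.List.pyGetD p (-1) 0) (h i)]) l := by
  induction idxs generalizing l with
  | nil => rfl
  | cons i idxs ih =>
    simp only [List.foldl_cons]
    have h1 : PySem.List.pyGetD (acc ++ l) (-1) 0 = PySem.List.pyGetD l (-1) 0 := by
      rw [PySem.List.pyGetD_neg_one (acc ++ l) 0 (by simp [hl]), PySem.List.pyGetD_neg_one l 0 hl,
        List.getLast_append_of_ne_nil _ hl]
    rw [h1, List.append_assoc]
    exact ih (l ++ [PySem.Int.bxor (PySem.List.pyGetD l (-1) 0) (h i)]) (by simp)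

-- the running-XOR scan, characterised
theorem fold_scan (h : Int → Int) (idxs : List Int) (b : Int) :
    idxs.foldl (fun p i => p ++ [PySem.Int.bxor (PySem.List.pyGetD p (-1) 0) (h i)]) [b]
      = (List.range (idxs.length + 1)).map
          (fun j => PySem.Int.bxor b (xorAll ((idxs.take j).map h))) := by
  induction idxs generalizing b with
  | nil => simp [xorAll]
  | cons i idxs ih =>
    simp only [List.foldl_cons]
    have : ([b] : List Int) ++ [PySem.Int.bxor (PySem.List.pyGetD [b] (-1) 0) (h i)]
        = [b] ++ [PySem.Int.bxor b (h i)] := by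
      rw [PySem.List.pyGetD_neg_one [b] 0 (by simp)]
      rfl
    rw [show ([b] : List Int) ++ [PySem.Int.bxor (PySem.List.pyGetD [b] (-1) 0) (h i)]
          = [b] ++ [PySem.Int.bxor b (h i)] from this,
      fold_shift h idxs [b] [PySem.Int.bxor b (h i)] (by simp),
      ih (PySem.Int.bxor b (h i))]
    rw [show List.range ((i :: idxs).length + 1) = 0 :: (List.range (idxs.length + 1)).map Nat.succ
          by rw [List.length_cons]; exact List.range_succ_eq_map]
    simp only [List.map_cons, List.map_map, List.take_zero, List.map_nil, List.singleton_append]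
    congr 1
    · show b = PySem.Int.bxor b (xorAll [])
      rw [show xorAll [] = 0 from rfl, PySem.Int.bxor_zero]
    · apply List.map_congr_left
      intro j _
      simp only [Function.comp_apply, List.take_succ_cons, List.map_cons]
      rw [xorAll_cons, ← bxor_assoc']

-- index segments of arr as take/drop
theorem map_getD_range (arr : List Int) (n : Nat) (hn : n ≤ arr.length) :
    (List.range n).map (fun k => arr.getD k 0) = arr.take n := by
  apply List.ext_getElem
  · simp [hn]
  · intro k h1 h2
    simp only [List.getElem_map, List.getElem_range, List.getElem_take]
    rw [List.getD_eq_getElem]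

theorem map_getD_range_drop (arr : List Int) (n j : Nat) (hn : n ≤ arr.length) :
    ((List.range n).drop j).map (fun k => arr.getD k 0) = (arr.take n).drop j := by
  apply List.ext_getElem
  · simp [hn]
  · intro k h1 h2
    simp only [List.getElem_map, List.getElem_drop, List.getElem_range, List.getElem_take]
    rw [List.getD_eq_getElem]

-- ===== VERDICT (by name: the statement is the Claim_ definition above) =====
theorem xor_of_all_element_spec : Claim_equal_xor_of_all_element := by
  intro arr size _ hpre
  unfold Pre_xor_of_all_element at hpre
  unfold Spec_xor_of_all_element xor_of_all_element xor_of_all_element_alt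
  dsimp only
  have hN : (if 0 < size then size else 0).toNat = size.toNat := by split <;> omega
  have hn : size.toNat ≤ arr.length := by omega
  have hrange : PySem.List.pyRange 0 size 1 = (List.range size.toNat).map (fun k : Nat => (k : Int)) :=
    PySem.List.pyRange_zero size
  have hrangeN : PySem.List.pyRange 0 (if 0 < size then size else 0) 1
      = (List.range size.toNat).map (fun k : Nat => (k : Int)) := by
    rw [PySem.List.pyRange_zero, hN]
  have hcount : PySem.List.pyRange ((if 0 < size then size else 0) - 1) (-1) (-1)
      = ((List.range size.toNat).map (fun k : Nat => (k : Int))).reverse := by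
    rw [PySem.List.pyRange_neg_one_eq_reverse,
      show (-1 : Int) + 1 = 0 from rfl,
      show (if 0 < size then size else 0) - 1 + 1 = (if 0 < size then size else 0) by ring,
      hrangeN]
  rw [hrange, hrangeN, hcount,
    PySem.List.foldl_append_singleton_eq_map, List.nil_append,
    fold_scan (fun i => PySem.List.pyGetD arr i 0),
    fold_scan (fun i => PySem.List.pyGetD arr i 0)]
  simp only [List.map_map, List.length_map, List.length_range, List.length_reverse]
  apply List.map_congr_left
  intro k hk
  have hkn : k < size.toNat := List.mem_range.mp hk
  have hcast : ((k : Int) + 1) = ((k + 1 : Nat) : Int) := by push_cast; ring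
  simp only [Function.comp_apply, PySem.List.pyGetD_natCast, hcast]
  -- the global XOR accumulator of A
  have hrr : List.foldl (fun rr i => PySem.Int.bxor rr (PySem.List.pyGetD arr i 0)) 0
      ((List.range size.toNat).map (fun k : Nat => (k : Int))) = xorAll (arr.take size.toNat) := by
    rw [List.foldl_map]
    have : (fun (a : Int) (j : Nat) => PySem.Int.bxor a (PySem.List.pyGetD arr (j : Int) 0))
        = fun (a : Int) (j : Nat) => PySem.Int.bxor a (arr.getD j 0) := by
      funext a j; rw [PySem.List.pyGetD_natCast]
    rw [this, ← List.foldl_map, map_getD_range arr _ hn]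
    rfl
  -- entry k of the prefix table
  have hpref : ((List.range (size.toNat + 1)).map
        (fun j => PySem.Int.bxor 0 (xorAll (List.map (fun i => PySem.List.pyGetD arr i 0)
          (List.take j ((List.range size.toNat).map (fun k : Nat => (k : Int)))))))).getD k 0
      = xorAll (arr.take k) := by
    rw [List.getD_eq_getElem _ _ (by simp; omega), List.getElem_map, List.getElem_range, zero_bxor]
    rw [← List.map_take, List.take_range, Nat.min_eq_left (le_of_lt hkn), List.map_map]
    have : ((fun i => PySem.List.pyGetD arr i 0) ∘ (fun j : Nat => (j : Int)))
        = fun j : Nat => arr.getD j 0 := by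
      funext j; simp [Function.comp, PySem.List.pyGetD_natCast]
    rw [this, map_getD_range arr _ (by omega)]
  -- entry k+1 of the suffix table
  have hsuf : (((List.range (size.toNat + 1)).map
        (fun j => PySem.Int.bxor 0 (xorAll (List.map (fun i => PySem.List.pyGetD arr i 0)
          (List.take j (((List.range size.toNat).map (fun k : Nat => (k : Int))).reverse)))))).reverse).getD
        (k + 1) 0
      = xorAll ((arr.take size.toNat).drop (k + 1)) := by
    rw [List.getD_eq_getElem _ _ (by simp; omega), List.getElem_reverse, List.getElem_map,
      List.getElem_range, zero_bxor, List.take_reverse]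
    simp only [List.length_map, List.length_range]
    rw [show size.toNat - (size.toNat + 1 - 1 - (k + 1)) = k + 1 by omega]
    rw [List.map_reverse, xorAll_reverse, ← List.map_drop, List.map_map]
    have : ((fun i => PySem.List.pyGetD arr i 0) ∘ (fun j : Nat => (j : Int)))
        = fun j : Nat => arr.getD j 0 := by
      funext j; simp [Function.comp, PySem.List.pyGetD_natCast]
    rw [this, map_getD_range_drop arr _ _ hn]
  rw [hrr, hpref, hsuf]
  -- the XOR algebra:  (P ^ (y ^ S)) ^ y = P ^ S  with  take n = take k ++ y :: drop (k+1)
  have hky : k < (arr.take size.toNat).length := by simp; omega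
  have htk : (arr.take size.toNat).take k = arr.take k := by
    rw [List.take_take, Nat.min_eq_left (le_of_lt hkn)]
  have hdropsplit : (arr.take size.toNat).drop k
      = arr.getD k 0 :: (arr.take size.toNat).drop (k + 1) := by
    rw [List.drop_eq_getElem_cons hky]
    congr 1
    rw [List.getElem_take, List.getD_eq_getElem _ _ (by omega)]
  conv_lhs => rw [show arr.take size.toNat
      = (arr.take size.toNat).take k ++ (arr.take size.toNat).drop k
      from (List.take_append_drop _ _).symm, hdropsplit]
  rw [xorAll_append, xorAll_cons, htk, bxor_cancel]
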